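-- pv_equiv track=rewrite | github.com/daeni-dang/Baekjoon_with_python | 스터디/0127/11052. 카드 구매하기.py | solution
-- ===== SOURCE A (Python) =====
-- def solution(n, cards):
--     dp = [0] * (n + 1)
--     for i in range(1, n + 1):
--         dp[i] = cards[0] * i
--     for i in range(1, n + 1):
--         for j in range(1, i // 2 + 1):
--             if dp[i] < dp[j] + dp[i - j]:
--                 dp[i] = dp[j] + dp[i - j]
--         if dp[i] < cards[i - 1]:
--             dp[i] = cards[i - 1]
--     return dp[n]
-- ===== SOURCE B (Python) =====
-- def solution(n, cards):
--     # Standard unbounded-knapsack DP: dp[i] = max over first-card-size j of cards[j-1] + dp[i-j].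
--     dp = [0]
--     for i in range(1, n + 1):
--         dp.append(max(cards[j - 1] + dp[i - j] for j in range(1, i + 1)))
--     return dp[n]
-- ===== Notes on version B (the rewrite author's own statement) =====
-- stated objective: idiomatic
-- what changed: Replaces A's pairwise-split recurrence dp[i]=max(dp[j]+dp[i-j]) over j<=i//2 with cards[0]*i and cards[i-1] base cases by the standard unbounded-knapsack recurrence dp[i]=max_{1<=j<=i}(cards[j-1]+dp[i-j]) built by appending, which needs no base cases.
import Mathlib
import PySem

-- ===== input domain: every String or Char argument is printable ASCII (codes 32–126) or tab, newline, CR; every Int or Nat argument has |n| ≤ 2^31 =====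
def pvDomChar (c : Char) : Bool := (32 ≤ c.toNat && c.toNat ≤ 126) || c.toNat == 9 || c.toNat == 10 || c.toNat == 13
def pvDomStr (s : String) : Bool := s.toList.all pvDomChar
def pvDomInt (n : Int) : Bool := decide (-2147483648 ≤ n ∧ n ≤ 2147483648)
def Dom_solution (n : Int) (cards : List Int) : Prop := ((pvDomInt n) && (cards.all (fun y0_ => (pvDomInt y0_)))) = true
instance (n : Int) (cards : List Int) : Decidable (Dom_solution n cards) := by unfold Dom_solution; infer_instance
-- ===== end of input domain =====

-- B replaces A's pairwise-split DP (dp[j]+dp[i-j] for j ≤ i//2, with cards[0]*i and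
-- cards[i-1] base cases) by the standard one-card-plus-remainder recurrence
-- dp[i] = max_{1≤j≤i} (cards[j-1] + dp[i-j]), building dp by appending (idiomatic, no base cases).

-- ===== PORT A =====
-- dp/cards reads and writes use pyGetD/pySetD: exact for the nonnegative in-range indices reached under Pre_.
def solution (n : Int) (cards : List Int) : Int :=
  let dp0 := PySem.List.pyRepeat [(0 : Int)] (n + 1)
  let dp1 := (PySem.List.pyRange 1 (n + 1) 1).foldl
    (fun dp i => PySem.List.pySetD dp i (PySem.List.pyGetD cards 0 0 * i)) dp0
  let dp2 := (PySem.List.pyRange 1 (n + 1) 1).foldl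
    (fun dp i =>
      let dp' := (PySem.List.pyRange 1 (PySem.Int.floordiv i 2 + 1) 1).foldl
        (fun dp j =>
          if PySem.List.pyGetD dp i 0 < PySem.List.pyGetD dp j 0 + PySem.List.pyGetD dp (i - j) 0
          then PySem.List.pySetD dp i (PySem.List.pyGetD dp j 0 + PySem.List.pyGetD dp (i - j) 0)
          else dp) dp
      if PySem.List.pyGetD dp' i 0 < PySem.List.pyGetD cards (i - 1) 0
      then PySem.List.pySetD dp' i (PySem.List.pyGetD cards (i - 1) 0)
      else dp') dp1
  PySem.List.pyGetD dp2 n 0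

-- ===== PORT B =====
def solution_alt (n : Int) (cards : List Int) : Int :=
  let dp := (PySem.List.pyRange 1 (n + 1) 1).foldl
    (fun dp i =>
      dp ++ [(PySem.List.max?
        ((PySem.List.pyRange 1 (i + 1) 1).map
          (fun j => PySem.List.pyGetD cards (j - 1) 0 + PySem.List.pyGetD dp (i - j) 0))
        (fun x => x)).getD 0]) [(0 : Int)]
  PySem.List.pyGetD dp n 0

-- ===== PRECONDITION & SPEC =====
-- Exactly where Python A returns: n < 0 makes the final dp[n] raise IndexError, and
-- n > len(cards) makes cards[i-1] (or cards[0]) raise IndexError.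
def Pre_solution (n : Int) (cards : List Int) : Prop := 0 ≤ n ∧ n ≤ (cards.length : Int)
instance (n : Int) (cards : List Int) : Decidable (Pre_solution n cards) := by
  unfold Pre_solution; infer_instance
def pvWitness_solution : Int × List Int := (3, [1, 5, 6, 7])

def Spec_solution (n : Int) (cards : List Int) (out : Int) : Prop := out = solution_alt n cards
instance (n : Int) (cards : List Int) (out : Int) : Decidable (Spec_solution n cards out) := by
  unfold Spec_solution; infer_instance

-- ===== CLAIM (what is proved, stated in full; the proofs are below) =====
def Claim_equal_solution : Prop := ∀ (n : Int) (cards : List Int), Dom_solution n cards → Pre_solution n cards → Spec_solution n cards (solution n cards)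

-- ===== LEMMAS AND PROOFS =====

-- The value both DPs compute, built as the list mlAux c i = [mval c 0, …, mval c i].
def mlAux (c : Nat → Int) : Nat → List Int
  | 0 => [0]
  | i + 1 =>
      let l := mlAux c i
      l ++ [((List.range i).map (fun k => c (k + 1) + l.getD (i - 1 - k) 0)).foldl
              max (c 0 + l.getD i 0)]

def mval (c : Nat → Int) (i : Nat) : Int := (mlAux c i).getD i 0

theorem mval_zero (c : Nat → Int) : mval c 0 = 0 := rfl

theorem length_mlAux (c : Nat → Int) (i : Nat) : (mlAux c i).length = i + 1 := by
  induction i with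
  | zero => rfl
  | succ i ih => simp [mlAux, ih]

theorem mlAux_getD (c : Nat → Int) (i k : Nat) (h : k ≤ i) :
    (mlAux c i).getD k 0 = mval c k := by
  induction i with
  | zero => interval_cases k; rfl
  | succ i ih =>
    rcases Nat.lt_or_ge k (i + 1) with hk | hk
    · have h1 : (mlAux c (i + 1)).getD k 0 = (mlAux c i).getD k 0 := by
        simp only [mlAux]
        exact List.getD_append _ _ _ _ (by rw [length_mlAux]; omega)
      rw [h1, ih (by omega)]
    · have hk' : k = i + 1 := by omega
      subst hk'; rfl

theorem mval_succ (c : Nat → Int) (i : Nat) :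
    mval c (i + 1) =
      ((List.range i).map (fun k => c (k + 1) + mval c (i - 1 - k))).foldl
        max (c 0 + mval c i) := by
  have h : mval c (i + 1)
      = ((List.range i).map (fun k => c (k + 1) + (mlAux c i).getD (i - 1 - k) 0)).foldl
          max (c 0 + (mlAux c i).getD i 0) := by
    show (mlAux c (i + 1)).getD (i + 1) 0 = _
    simp only [mlAux]
    rw [List.getD_append_right _ _ _ _ (by rw [length_mlAux])]
    simp [length_mlAux]
  rw [h, mlAux_getD c i i le_rfl]
  congr 1
  apply List.map_congr_left
  intro k hk
  rw [mlAux_getD c i (i - 1 - k) (by omega)]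

theorem mlAux_succ (c : Nat → Int) (i : Nat) :
    mlAux c (i + 1) = mlAux c i ++ [mval c (i + 1)] := by
  conv_lhs => rw [mlAux]
  congr 2
  have h : mval c (i + 1)
      = ((List.range i).map (fun k => c (k + 1) + (mlAux c i).getD (i - 1 - k) 0)).foldl
          max (c 0 + (mlAux c i).getD i 0) := by
    show (mlAux c (i + 1)).getD (i + 1) 0 = _
    simp only [mlAux]
    rw [List.getD_append_right _ _ _ _ (by rw [length_mlAux])]
    simp [length_mlAux]
  rw [h]

-- every candidate "buy a packet of k+1 cards first" is ≤ mval (i+1)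
theorem cand_le (c : Nat → Int) (i k : Nat) (hk : k ≤ i) :
    c k + mval c (i - k) ≤ mval c (i + 1) := by
  rw [mval_succ]
  rcases k with _ | t
  · simpa using (PySem.List.le_foldl_max _ _).1
  · exact (PySem.List.le_foldl_max _ _).2 _
      (List.mem_map.2 ⟨t, List.mem_range.2 (by omega), by rw [show i - 1 - t = i - (t + 1) by omega]⟩)

theorem mval_attained (c : Nat → Int) (i : Nat) :
    ∃ k ≤ i, mval c (i + 1) = c k + mval c (i - k) := by
  rw [mval_succ]
  rcases PySem.List.foldl_max_mem
      ((List.range i).map (fun k => c (k + 1) + mval c (i - 1 - k))) (c 0 + mval c i) with h | h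
  · exact ⟨0, Nat.zero_le _, by simpa using h⟩
  · rcases List.mem_map.1 h with ⟨t, ht, hv⟩
    exact ⟨t + 1, by simpa using Nat.succ_le_of_lt (List.mem_range.1 ht),
      by rw [← hv, show i - 1 - t = i - (t + 1) by omega]⟩

theorem single_le (c : Nat → Int) (i : Nat) : c i ≤ mval c (i + 1) := by
  have h := cand_le c i i le_rfl
  simpa [mval_zero] using h

theorem base_le (c : Nat → Int) : ∀ i : Nat, c 0 * (i : Int) ≤ mval c i := by
  intro i
  induction i with
  | zero => simp [mval_zero]
  | succ i ih =>
    have h := cand_le c i 0 (Nat.zero_le i)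
    simp only [Nat.sub_zero] at h
    have h2 : c 0 + c 0 * (i : Int) ≤ mval c (i + 1) := le_trans (by omega) h
    calc c 0 * ((i : Int) + 1) = c 0 + c 0 * (i : Int) := by ring
    _ ≤ mval c (i + 1) := h2

theorem superadd (c : Nat → Int) : ∀ a b : Nat, mval c a + mval c b ≤ mval c (a + b) := by
  intro a
  induction a using Nat.strong_induction_on with
  | _ a ih =>
    intro b
    rcases a with _ | a
    · simp [mval_zero]
    · rcases mval_attained c a with ⟨k, hk, hval⟩
      have h1 : mval c (a - k) + mval c b ≤ mval c (a - k + b) := ih (a - k) (by omega) b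
      have h2 : c k + mval c (a - k + b) ≤ mval c (a + 1 + b) := by
        have h := cand_le c (a + b) k (by omega)
        rw [show a + b - k = a - k + b by omega] at h
        rw [show a + 1 + b = a + b + 1 by omega]
        exact h
      omega

theorem foldl_max_le (t : List Int) (a B : Int) (ha : a ≤ B) (ht : ∀ x ∈ t, x ≤ B) :
    t.foldl max a ≤ B := by
  rcases PySem.List.foldl_max_mem t a with h | h
  · rw [h]; exact ha
  · exact ht _ h

-- A's per-row value (pair splits up to i//2, then cards[0]*i and cards[i-1]) equals mval.
theorem maxEq (c : Nat → Int) (m : Nat) :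
    max ((PySem.List.pyRange 1 (PySem.Int.floordiv ((m : Int) + 1) 2 + 1) 1).foldl
          (fun a j => max a (mval c j.toNat + mval c (((m : Int) + 1) - j).toNat))
          (c 0 * ((m : Int) + 1)))
        (c m)
    = mval c (m + 1) := by
  have hfd : PySem.Int.floordiv ((m : Int) + 1) 2 = (((m + 1) / 2 : Nat) : Int) := by
    rw [show ((m : Int) + 1) = ((m + 1 : Nat) : Int) by push_cast; ring]
    exact_mod_cast PySem.Int.floordiv_natCast (m + 1) 2
  apply le_antisymm
  · apply max_le
    · rw [← List.foldl_map]
      apply foldl_max_le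
      · rw [show ((m : Int) + 1) = ((m + 1 : Nat) : Int) by push_cast; ring]
        exact base_le c (m + 1)
      · intro x hx
        rcases List.mem_map.1 hx with ⟨j, hj, rfl⟩
        rw [PySem.List.mem_pyRange_one, hfd] at hj
        have hj1 : 1 ≤ j := hj.1
        have hj2 : j.toNat ≤ (m + 1) / 2 := by omega
        have hsum : j.toNat + (((m : Int) + 1) - j).toNat = m + 1 := by omega
        calc mval c j.toNat + mval c (((m : Int) + 1) - j).toNat
            ≤ mval c (j.toNat + (((m : Int) + 1) - j).toNat) := superadd c _ _
          _ = mval c (m + 1) := by rw [hsum]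
    · exact single_le c m
  · rcases mval_attained c m with ⟨k, hk, hval⟩
    rcases Nat.lt_or_ge k m with hkm | hkm
    · -- split part j = k+1 < m+1; combine with remainder m-k ≥ 1
      have hck : c k + mval c 0 ≤ mval c (k + 1) := by
        have := cand_le c k k le_rfl
        simpa using this
      have hstep : mval c (m + 1) ≤ mval c (k + 1) + mval c (m - k) := by
        rw [hval]; rw [mval_zero] at hck; omega
      -- the smaller side j' of the split is in A's range
      set j' : Nat := min (k + 1) (m - k) with hj'
      have hj'1 : 1 ≤ j' := by omega
      have hj'2 : 2 * j' ≤ m + 1 := by omega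
      have hcomb : mval c (k + 1) + mval c (m - k) = mval c j' + mval c (m + 1 - j') := by
        rcases Nat.le_total (k + 1) (m - k) with h | h
        · rw [show m + 1 - j' = m - k by omega, show j' = k + 1 by omega]
        · rw [show m + 1 - j' = k + 1 by omega, show j' = m - k by omega]; ring
      have hmem : ((j' : Nat) : Int) ∈ PySem.List.pyRange 1 (PySem.Int.floordiv ((m : Int) + 1) 2 + 1) 1 := by
        rw [PySem.List.mem_pyRange_one, hfd]
        constructor
        · exact_mod_cast hj'1
        · have : j' ≤ (m + 1) / 2 := by omega
          omega
      have hle : mval c j' + mval c (m + 1 - j')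
          ≤ (PySem.List.pyRange 1 (PySem.Int.floordiv ((m : Int) + 1) 2 + 1) 1).foldl
              (fun a j => max a (mval c j.toNat + mval c (((m : Int) + 1) - j).toNat))
              (c 0 * ((m : Int) + 1)) := by
        rw [← List.foldl_map]
        apply (PySem.List.le_foldl_max _ _).2
        apply List.mem_map.2
        refine ⟨((j' : Nat) : Int), hmem, ?_⟩
        have e1 : ((j' : Nat) : Int).toNat = j' := by omega
        have e2 : (((m : Int) + 1) - ((j' : Nat) : Int)).toNat = m + 1 - j' := by omega
        simp only [e1, e2]
      calc mval c (m + 1) ≤ mval c j' + mval c (m + 1 - j') := by omega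
        _ ≤ _ := hle
        _ ≤ _ := le_max_left _ _
    · -- k = m: the single-purchase candidate cards[i-1]
      have hk' : k = m := by omega
      subst hk'
      rw [hval]
      simp [mval_zero]

-- reading/writing dp through Int indices, reduced to Nat set/getD
theorem pyGetD_pySetD_int (dp : List Int) (i x v : Int) (hi0 : 0 ≤ i)
    (hi : i < (dp.length : Int)) (hx0 : 0 ≤ x) :
    PySem.List.pyGetD (PySem.List.pySetD dp i v) x 0
      = if x = i then v else PySem.List.pyGetD dp x 0 := by
  obtain ⟨ni, rfl⟩ : ∃ ni : Nat, i = (ni : Int) := ⟨i.toNat, by omega⟩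
  obtain ⟨nx, rfl⟩ : ∃ nx : Nat, x = (nx : Int) := ⟨x.toNat, by omega⟩
  rw [PySem.List.pyGetD_pySetD_natCast dp ni nx v 0 (by omega)]
  by_cases h : nx = ni
  · simp [h]
  · simp [h, show ((nx : Int) ≠ (ni : Int)) from by exact_mod_cast h]

theorem pySetD_pySetD (dp : List Int) (i : Int) (h : 0 ≤ i) (v w : Int) :
    PySem.List.pySetD (PySem.List.pySetD dp i v) i w = PySem.List.pySetD dp i w := by
  obtain ⟨ni, rfl⟩ : ∃ ni : Nat, i = (ni : Int) := ⟨i.toNat, by omega⟩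
  simp [PySem.List.pySetD_natCast, List.set_set]

theorem pySetD_self (dp : List Int) (i : Int) (h0 : 0 ≤ i) (h : i < (dp.length : Int)) :
    PySem.List.pySetD dp i (PySem.List.pyGetD dp i 0) = dp := by
  obtain ⟨ni, rfl⟩ : ∃ ni : Nat, i = (ni : Int) := ⟨i.toNat, by omega⟩
  rw [PySem.List.pySetD_natCast, PySem.List.pyGetD_natCast]
  apply List.ext_getElem (by simp)
  intro k h1 h2
  rw [List.getElem_set]
  split
  · next heq => subst heq; exact List.getD_eq_getElem _ _ (by omega)
  · rfl

theorem getD_set (l : List Int) (i k : Nat) (v : Int) (hi : i < l.length) :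
    (l.set i v).getD k 0 = if k = i then v else l.getD k 0 := by
  by_cases hk : k < l.length
  · rw [List.getD_eq_getElem _ _ (by simpa using hk), List.getElem_set]
    by_cases h : k = i
    · simp [h]
    · rw [if_neg (Ne.symm h), if_neg h]
      exact (List.getD_eq_getElem _ _ hk).symm
  · have h1 : k ≠ i := by omega
    have h2 : (l.set i v).getD k 0 = 0 := by
      rw [List.getD_eq_getElem?_getD, List.getElem?_eq_none (by simpa using hk)]; rfl
    have h3 : l.getD k 0 = 0 := by
      rw [List.getD_eq_getElem?_getD, List.getElem?_eq_none (by omega)]; rfl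
    rw [if_neg h1, h2, h3]

-- the inner j-loop only updates dp[i]: it is one pySetD of a running max
theorem inner_fold (i : Int) (hi : 1 ≤ i) : ∀ (js : List Int),
    (∀ j ∈ js, 1 ≤ j ∧ 2 * j ≤ i) →
    ∀ dp : List Int, i < (dp.length : Int) →
    js.foldl (fun dp j =>
        if PySem.List.pyGetD dp i 0 < PySem.List.pyGetD dp j 0 + PySem.List.pyGetD dp (i - j) 0
        then PySem.List.pySetD dp i (PySem.List.pyGetD dp j 0 + PySem.List.pyGetD dp (i - j) 0)
        else dp) dp
    = PySem.List.pySetD dp i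
        (js.foldl (fun a j => max a (PySem.List.pyGetD dp j 0 + PySem.List.pyGetD dp (i - j) 0))
          (PySem.List.pyGetD dp i 0)) := by
  intro js
  induction js with
  | nil =>
    intro _ dp hdp
    simpa using (pySetD_self dp i (by omega) hdp).symm
  | cons j rest ih =>
    intro hjs dp hdp
    have hj1 : (1 : Int) ≤ j := (hjs j (by simp)).1
    have hj2 : 2 * j ≤ i := (hjs j (by simp)).2
    simp only [List.foldl_cons]
    by_cases hcond : PySem.List.pyGetD dp i 0 < PySem.List.pyGetD dp j 0 + PySem.List.pyGetD dp (i - j) 0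
    · rw [if_pos hcond]
      have hlen' : i < ((PySem.List.pySetD dp i
          (PySem.List.pyGetD dp j 0 + PySem.List.pyGetD dp (i - j) 0)).length : Int) := by
        rw [PySem.List.length_pySetD]; exact hdp
      rw [ih (fun x hx => hjs x (by simp [hx])) _ hlen']
      have hread : ∀ x : Int, 0 ≤ x → x ≠ i →
          PySem.List.pyGetD (PySem.List.pySetD dp i
            (PySem.List.pyGetD dp j 0 + PySem.List.pyGetD dp (i - j) 0)) x 0
          = PySem.List.pyGetD dp x 0 := by
        intro x hx0 hxne
        rw [pyGetD_pySetD_int dp i x _ (by omega) hdp hx0, if_neg hxne]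
      have hreadI : PySem.List.pyGetD (PySem.List.pySetD dp i
            (PySem.List.pyGetD dp j 0 + PySem.List.pyGetD dp (i - j) 0)) i 0
          = PySem.List.pyGetD dp j 0 + PySem.List.pyGetD dp (i - j) 0 := by
        rw [pyGetD_pySetD_int dp i i _ (by omega) hdp (by omega), if_pos rfl]
      rw [pySetD_pySetD dp i (by omega)]
      congr 1
      rw [hreadI, max_eq_right (le_of_lt hcond)]
      apply PySem.List.foldl_congr_mem
      intro acc x hx
      have hx1 : (1 : Int) ≤ x := (hjs x (by simp [hx])).1
      have hx2 : 2 * x ≤ i := (hjs x (by simp [hx])).2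
      rw [hread x (by omega) (by omega), hread (i - x) (by omega) (by omega)]
    · rw [if_neg hcond]
      rw [ih (fun x hx => hjs x (by simp [hx])) _ hdp]
      congr 1
      rw [max_eq_left (by omega)]

-- phase 1: dp[i] = cards[0] * i everywhere
theorem phase1 (c0 : Int) (N : Nat) : ∀ m : Nat, m ≤ N →
    (((PySem.List.pyRange 1 ((m : Int) + 1) 1).foldl
        (fun dp i => PySem.List.pySetD dp i (c0 * i)) (List.replicate (N + 1) (0 : Int))).length = N + 1)
    ∧ (∀ k : Nat, k ≤ N →
        ((PySem.List.pyRange 1 ((m : Int) + 1) 1).foldl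
          (fun dp i => PySem.List.pySetD dp i (c0 * i)) (List.replicate (N + 1) (0 : Int))).getD k 0
        = if k ≤ m then c0 * (k : Int) else 0) := by
  intro m
  induction m with
  | zero =>
    intro _
    rw [show ((0 : Nat) : Int) + 1 = 1 by norm_num, PySem.List.pyRange_one_eq_nil le_rfl]
    constructor
    · simp
    · intro k hk
      have hr : (List.replicate (N + 1) (0 : Int)).getD k 0 = 0 := by
        rw [List.getD_eq_getElem?_getD, List.getElem?_replicate]
        split <;> rfl
      simp only [List.foldl_nil, hr]
      rcases Nat.eq_zero_or_pos k with h | h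
      · subst h; simp
      · rw [if_neg (by omega)]
  | succ m ih =>
    intro hm
    obtain ⟨ihL, ihD⟩ := ih (by omega)
    have hsplit : PySem.List.pyRange 1 (((m + 1 : Nat) : Int) + 1) 1
        = PySem.List.pyRange 1 ((m : Int) + 1) 1 ++ [(m : Int) + 1] := by
      rw [show (((m + 1 : Nat) : Int) + 1) = ((m : Int) + 1) + 1 by push_cast; ring]
      exact PySem.List.pyRange_one_succ_right (by omega)
    rw [hsplit, List.foldl_append]
    simp only [List.foldl_cons, List.foldl_nil]
    have hset : ∀ (xs : List Int) (v : Int),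
        PySem.List.pySetD xs ((m : Int) + 1) v = xs.set (m + 1) v := by
      intro xs v
      rw [show ((m : Int) + 1) = ((m + 1 : Nat) : Int) by push_cast; ring,
          PySem.List.pySetD_natCast]
    rw [hset]
    constructor
    · rw [List.length_set, ihL]
    · intro k hk
      rw [getD_set _ _ _ _ (by rw [ihL]; omega)]
      by_cases hkm : k = m + 1
      · subst hkm
        rw [if_pos rfl, if_pos le_rfl]
        push_cast; ring
      · rw [if_neg hkm, ihD k hk]
        by_cases h2 : k ≤ m
        · rw [if_pos h2, if_pos (by omega)]
        · rw [if_neg h2, if_neg (by omega)]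

-- phase 2 invariant: processed prefix holds mval, the rest still cards[0]*k
-- one outer iteration i = m+1 sets dp[m+1] := mval (m+1) and changes nothing else
theorem body_step (cards : List Int) (N m : Nat) (hm : m + 1 ≤ N) (r : List Int)
    (hL : r.length = N + 1)
    (hD : ∀ k : Nat, k ≤ N → r.getD k 0
        = if k ≤ m then mval (fun t => cards.getD t 0) k else cards.getD 0 0 * (k : Int)) :
    (if PySem.List.pyGetD
          ((PySem.List.pyRange 1 (PySem.Int.floordiv ((m : Int) + 1) 2 + 1) 1).foldl
            (fun dp j =>
              if PySem.List.pyGetD dp ((m : Int) + 1) 0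
                  < PySem.List.pyGetD dp j 0 + PySem.List.pyGetD dp (((m : Int) + 1) - j) 0
              then PySem.List.pySetD dp ((m : Int) + 1)
                (PySem.List.pyGetD dp j 0 + PySem.List.pyGetD dp (((m : Int) + 1) - j) 0)
              else dp) r) ((m : Int) + 1) 0
        < PySem.List.pyGetD cards ((m : Int) + 1 - 1) 0
    then PySem.List.pySetD
          ((PySem.List.pyRange 1 (PySem.Int.floordiv ((m : Int) + 1) 2 + 1) 1).foldl
            (fun dp j =>
              if PySem.List.pyGetD dp ((m : Int) + 1) 0
                  < PySem.List.pyGetD dp j 0 + PySem.List.pyGetD dp (((m : Int) + 1) - j) 0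
              then PySem.List.pySetD dp ((m : Int) + 1)
                (PySem.List.pyGetD dp j 0 + PySem.List.pyGetD dp (((m : Int) + 1) - j) 0)
              else dp) r) ((m : Int) + 1) (PySem.List.pyGetD cards ((m : Int) + 1 - 1) 0)
    else (PySem.List.pyRange 1 (PySem.Int.floordiv ((m : Int) + 1) 2 + 1) 1).foldl
            (fun dp j =>
              if PySem.List.pyGetD dp ((m : Int) + 1) 0
                  < PySem.List.pyGetD dp j 0 + PySem.List.pyGetD dp (((m : Int) + 1) - j) 0
              then PySem.List.pySetD dp ((m : Int) + 1)
                (PySem.List.pyGetD dp j 0 + PySem.List.pyGetD dp (((m : Int) + 1) - j) 0)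
              else dp) r)
    = r.set (m + 1) (mval (fun t => cards.getD t 0) (m + 1)) := by
  have hfd : PySem.Int.floordiv ((m : Int) + 1) 2 = (((m + 1) / 2 : Nat) : Int) := by
    rw [show ((m : Int) + 1) = ((m + 1 : Nat) : Int) by push_cast; ring]
    exact_mod_cast PySem.Int.floordiv_natCast (m + 1) 2
  have hjs : ∀ j ∈ PySem.List.pyRange 1 (PySem.Int.floordiv ((m : Int) + 1) 2 + 1) 1,
      1 ≤ j ∧ 2 * j ≤ (m : Int) + 1 := by
    intro j hj
    rw [PySem.List.mem_pyRange_one, hfd] at hj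
    omega
  have hri : (m : Int) + 1 < (r.length : Int) := by rw [hL]; omega
  rw [inner_fold ((m : Int) + 1) (by omega) _ hjs r hri]
  -- dp reads inside the running max are settled prefix values
  have hgetri : PySem.List.pyGetD r ((m : Int) + 1) 0 = cards.getD 0 0 * ((m : Int) + 1) := by
    rw [show ((m : Int) + 1) = ((m + 1 : Nat) : Int) by push_cast; ring,
        PySem.List.pyGetD_natCast, hD (m + 1) hm, if_neg (by omega)]
  have hVcong :
      (PySem.List.pyRange 1 (PySem.Int.floordiv ((m : Int) + 1) 2 + 1) 1).foldl
        (fun a j => max a (PySem.List.pyGetD r j 0 + PySem.List.pyGetD r (((m : Int) + 1) - j) 0))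
        (PySem.List.pyGetD r ((m : Int) + 1) 0)
      = (PySem.List.pyRange 1 (PySem.Int.floordiv ((m : Int) + 1) 2 + 1) 1).foldl
        (fun a j => max a (mval (fun t => cards.getD t 0) j.toNat
          + mval (fun t => cards.getD t 0) (((m : Int) + 1) - j).toNat))
        (cards.getD 0 0 * ((m : Int) + 1)) := by
    rw [hgetri]
    apply PySem.List.foldl_congr_mem
    intro acc x hx
    have hx1 : (1 : Int) ≤ x := (hjs x hx).1
    have hx2 : 2 * x ≤ (m : Int) + 1 := (hjs x hx).2
    have e1 : x = ((x.toNat : Nat) : Int) := by omega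
    rw [e1, PySem.List.pyGetD_natCast, hD x.toNat (by omega), if_pos (by omega)]
    rw [show ((m : Int) + 1) - ((x.toNat : Nat) : Int) = (((m + 1 - x.toNat : Nat) : Nat) : Int) by omega,
        PySem.List.pyGetD_natCast, hD (m + 1 - x.toNat) (by omega), if_pos (by omega)]
    simp only [Int.toNat_natCast]
  rw [hVcong]
  set F := (PySem.List.pyRange 1 (PySem.Int.floordiv ((m : Int) + 1) 2 + 1) 1).foldl
        (fun a j => max a (mval (fun t => cards.getD t 0) j.toNat
          + mval (fun t => cards.getD t 0) (((m : Int) + 1) - j).toNat))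
        (cards.getD 0 0 * ((m : Int) + 1)) with hF
  have hcm : PySem.List.pyGetD cards ((m : Int) + 1 - 1) 0 = cards.getD m 0 := by
    rw [show ((m : Int) + 1 - 1) = ((m : Nat) : Int) by ring, PySem.List.pyGetD_natCast]
  have hread : PySem.List.pyGetD (PySem.List.pySetD r ((m : Int) + 1) F) ((m : Int) + 1) 0 = F := by
    rw [pyGetD_pySetD_int r ((m : Int) + 1) ((m : Int) + 1) F (by omega) hri (by omega), if_pos rfl]
  have hmx : max F (cards.getD m 0) = mval (fun t => cards.getD t 0) (m + 1) := by
    rw [hF]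
    exact maxEq (fun t => cards.getD t 0) m
  have hset : ∀ (xs : List Int) (v : Int),
      PySem.List.pySetD xs ((m : Int) + 1) v = xs.set (m + 1) v := by
    intro xs v
    rw [show ((m : Int) + 1) = ((m + 1 : Nat) : Int) by push_cast; ring,
        PySem.List.pySetD_natCast]
  rw [hcm, hread]
  split_ifs with h
  · rw [pySetD_pySetD r ((m : Int) + 1) (by omega), hset]
    congr 1
    rw [← hmx, max_eq_right (le_of_lt h)]
  · rw [hset]
    congr 1
    rw [← hmx, max_eq_left (not_lt.mp h)]

theorem phase2 (cards : List Int) (N : Nat) (dp1 : List Int)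
    (hlen : dp1.length = N + 1)
    (hinit : ∀ k : Nat, k ≤ N → dp1.getD k 0 = cards.getD 0 0 * (k : Int)) :
    ∀ m : Nat, m ≤ N →
    (((PySem.List.pyRange 1 ((m : Int) + 1) 1).foldl
        (fun dp i =>
          if PySem.List.pyGetD ((PySem.List.pyRange 1 (PySem.Int.floordiv i 2 + 1) 1).foldl
              (fun dp j =>
                if PySem.List.pyGetD dp i 0 < PySem.List.pyGetD dp j 0 + PySem.List.pyGetD dp (i - j) 0
                then PySem.List.pySetD dp i (PySem.List.pyGetD dp j 0 + PySem.List.pyGetD dp (i - j) 0)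
                else dp) dp) i 0 < PySem.List.pyGetD cards (i - 1) 0
          then PySem.List.pySetD ((PySem.List.pyRange 1 (PySem.Int.floordiv i 2 + 1) 1).foldl
              (fun dp j =>
                if PySem.List.pyGetD dp i 0 < PySem.List.pyGetD dp j 0 + PySem.List.pyGetD dp (i - j) 0
                then PySem.List.pySetD dp i (PySem.List.pyGetD dp j 0 + PySem.List.pyGetD dp (i - j) 0)
                else dp) dp) i (PySem.List.pyGetD cards (i - 1) 0)
          else (PySem.List.pyRange 1 (PySem.Int.floordiv i 2 + 1) 1).foldl
              (fun dp j =>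
                if PySem.List.pyGetD dp i 0 < PySem.List.pyGetD dp j 0 + PySem.List.pyGetD dp (i - j) 0
                then PySem.List.pySetD dp i (PySem.List.pyGetD dp j 0 + PySem.List.pyGetD dp (i - j) 0)
                else dp) dp) dp1).length = N + 1)
    ∧ (∀ k : Nat, k ≤ N →
        ((PySem.List.pyRange 1 ((m : Int) + 1) 1).foldl
        (fun dp i =>
          if PySem.List.pyGetD ((PySem.List.pyRange 1 (PySem.Int.floordiv i 2 + 1) 1).foldl
              (fun dp j =>
                if PySem.List.pyGetD dp i 0 < PySem.List.pyGetD dp j 0 + PySem.List.pyGetD dp (i - j) 0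
                then PySem.List.pySetD dp i (PySem.List.pyGetD dp j 0 + PySem.List.pyGetD dp (i - j) 0)
                else dp) dp) i 0 < PySem.List.pyGetD cards (i - 1) 0
          then PySem.List.pySetD ((PySem.List.pyRange 1 (PySem.Int.floordiv i 2 + 1) 1).foldl
              (fun dp j =>
                if PySem.List.pyGetD dp i 0 < PySem.List.pyGetD dp j 0 + PySem.List.pyGetD dp (i - j) 0
                then PySem.List.pySetD dp i (PySem.List.pyGetD dp j 0 + PySem.List.pyGetD dp (i - j) 0)
                else dp) dp) i (PySem.List.pyGetD cards (i - 1) 0)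
          else (PySem.List.pyRange 1 (PySem.Int.floordiv i 2 + 1) 1).foldl
              (fun dp j =>
                if PySem.List.pyGetD dp i 0 < PySem.List.pyGetD dp j 0 + PySem.List.pyGetD dp (i - j) 0
                then PySem.List.pySetD dp i (PySem.List.pyGetD dp j 0 + PySem.List.pyGetD dp (i - j) 0)
                else dp) dp) dp1).getD k 0
        = if k ≤ m then mval (fun t => cards.getD t 0) k else cards.getD 0 0 * (k : Int)) := by
  intro m
  induction m with
  | zero =>
    intro _
    rw [show ((0 : Nat) : Int) + 1 = 1 by norm_num, PySem.List.pyRange_one_eq_nil le_rfl]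
    constructor
    · simpa using hlen
    · intro k hk
      simp only [List.foldl_nil]
      rcases Nat.eq_zero_or_pos k with h | h
      · subst h
        rw [if_pos le_rfl, hinit 0 (by omega), mval_zero]
        simp
      · rw [if_neg (by omega), hinit k hk]
  | succ m ih =>
    intro hm
    obtain ⟨ihL, ihD⟩ := ih (by omega)
    have hsplit : PySem.List.pyRange 1 (((m + 1 : Nat) : Int) + 1) 1
        = PySem.List.pyRange 1 ((m : Int) + 1) 1 ++ [(m : Int) + 1] := by
      rw [show (((m + 1 : Nat) : Int) + 1) = ((m : Int) + 1) + 1 by push_cast; ring]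
      exact PySem.List.pyRange_one_succ_right (by omega)
    rw [hsplit, List.foldl_append]
    simp only [List.foldl_cons, List.foldl_nil]
    rw [body_step cards N m hm _ ihL ihD]
    constructor
    · rw [List.length_set, ihL]
    · intro k hk
      rw [getD_set _ _ _ _ (by rw [ihL]; omega)]
      by_cases hkm : k = m + 1
      · subst hkm
        rw [if_pos rfl, if_pos le_rfl]
      · rw [if_neg hkm, ihD k hk]
        by_cases h2 : k ≤ m
        · rw [if_pos h2, if_pos (by omega)]
        · rw [if_neg h2, if_neg (by omega)]

theorem solution_eq (n : Int) (cards : List Int) (hn : 0 ≤ n) :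
    solution n cards = mval (fun t => cards.getD t 0) n.toNat := by
  obtain ⟨N, rfl⟩ : ∃ N : Nat, n = (N : Int) := ⟨n.toNat, (Int.toNat_of_nonneg hn).symm⟩
  simp only [solution]
  rw [PySem.List.pyRepeat_singleton, show ((N : Int) + 1).toNat = N + 1 by omega]
  obtain ⟨h1L, h1D⟩ := phase1 (PySem.List.pyGetD cards 0 0) N N le_rfl
  have hinit : ∀ k : Nat, k ≤ N →
      ((PySem.List.pyRange 1 ((N : Int) + 1) 1).foldl
        (fun dp i => PySem.List.pySetD dp i (PySem.List.pyGetD cards 0 0 * i))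
        (List.replicate (N + 1) (0 : Int))).getD k 0 = cards.getD 0 0 * (k : Int) := by
    intro k hk
    rw [h1D k hk, if_pos hk, PySem.List.pyGetD_zero]
  obtain ⟨h2L, h2D⟩ := phase2 cards N _ h1L hinit N le_rfl
  rw [PySem.List.pyGetD_natCast, h2D N le_rfl, if_pos le_rfl]
  simp

theorem cand_list_eq (cards : List Int) (m : Nat) :
    (List.range (m + 1)).map
        (fun k => cards.getD k 0 + mval (fun t => cards.getD t 0) (m - k))
      = (cards.getD 0 0 + mval (fun t => cards.getD t 0) m)
        :: (List.range m).map
            (fun k => cards.getD (k + 1) 0 + mval (fun t => cards.getD t 0) (m - 1 - k)) := by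
  rw [List.range_succ_eq_map, List.map_cons, List.map_map]
  congr 1
  apply List.map_congr_left
  intro k hk
  simp only [Function.comp_apply, Nat.succ_eq_add_one]
  rw [show m - (k + 1) = m - 1 - k from by omega]

theorem solution_alt_eq (n : Int) (cards : List Int) (hn : 0 ≤ n) :
    solution_alt n cards = mval (fun t => cards.getD t 0) n.toNat := by
  obtain ⟨N, rfl⟩ : ∃ N : Nat, n = (N : Int) := ⟨n.toNat, (Int.toNat_of_nonneg hn).symm⟩
  have key : ∀ m : Nat,
      (PySem.List.pyRange 1 ((m : Int) + 1) 1).foldl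
        (fun dp i =>
          dp ++ [(PySem.List.max?
            ((PySem.List.pyRange 1 (i + 1) 1).map
              (fun j => PySem.List.pyGetD cards (j - 1) 0 + PySem.List.pyGetD dp (i - j) 0))
            (fun x => x)).getD 0]) [(0 : Int)]
      = mlAux (fun t => cards.getD t 0) m := by
    intro m
    induction m with
    | zero =>
      rw [show ((0 : Nat) : Int) + 1 = 1 by norm_num, PySem.List.pyRange_one_eq_nil le_rfl]
      rfl
    | succ m ih =>
      have hsplit : PySem.List.pyRange 1 (((m + 1 : Nat) : Int) + 1) 1
          = PySem.List.pyRange 1 ((m : Int) + 1) 1 ++ [(m : Int) + 1] := by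
        rw [show (((m + 1 : Nat) : Int) + 1) = ((m : Int) + 1) + 1 by push_cast; ring]
        exact PySem.List.pyRange_one_succ_right (by omega)
      rw [hsplit, List.foldl_append, ih]
      simp only [List.foldl_cons, List.foldl_nil]
      rw [mlAux_succ]
      congr 1
      have hcand : (PySem.List.pyRange 1 (((m : Int) + 1) + 1) 1).map
            (fun j => PySem.List.pyGetD cards (j - 1) 0
              + PySem.List.pyGetD (mlAux (fun t => cards.getD t 0) m) (((m : Int) + 1) - j) 0)
          = (List.range (m + 1)).map
              (fun k => cards.getD k 0 + mval (fun t => cards.getD t 0) (m - k)) := by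
        rw [PySem.List.pyRange_one, show ((((m : Int) + 1) + 1) - 1).toNat = m + 1 by omega,
            List.map_map]
        apply List.map_congr_left
        intro k hk
        have hk' : k ≤ m := by
          have := List.mem_range.mp hk
          omega
        simp only [Function.comp_apply]
        rw [show (1 : Int) + (k : Int) - 1 = ((k : Nat) : Int) by ring,
            PySem.List.pyGetD_natCast,
            show ((m : Int) + 1) - (1 + (k : Int)) = ((m - k : Nat) : Int) by omega,
            PySem.List.pyGetD_natCast, mlAux_getD _ m (m - k) (by omega)]
      rw [hcand, cand_list_eq cards m, PySem.List.max?_id_cons]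
      simp only [Option.getD_some]
      exact congrArg (· :: []) (mval_succ (fun t => cards.getD t 0) m).symm
  simp only [solution_alt]
  rw [key N, PySem.List.pyGetD_natCast, mlAux_getD _ N N le_rfl]
  simp

-- ===== VERDICT (by name: the statement is the Claim_ definition above) =====
theorem solution_spec : Claim_equal_solution := by
  intro n cards _ hpre
  unfold Spec_solution
  rw [solution_eq n cards hpre.1, solution_alt_eq n cards hpre.1]
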